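-- pv_equiv track=rewrite | github.com/cai-liosatos/Invoice-Generator | main.py | Pdf_check
-- ===== SOURCE A (Python) =====
-- def Pdf_check(dirlist):
--     try:
--         file = dirlist[-1].split('_')
--     except:
--         return False
--
--     if (len(file) != 3) or (file[2][-3:] != 'pdf') or (file[0] != 'Invoice') or (len(file[2]) != 12):
--         dirlist.pop(-1)
--         file = Pdf_check(dirlist)
--     if file:
--         try:
--             int(file[1][0:-2])
--         except:
--             dirlist.pop(-1)
--             file = Pdf_check(dirlist)
--
--     return file
-- ===== SOURCE B (Python) =====
-- # Iterative while-loop scanning from the end, replacing A's double self-recursion;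
-- # same return values (the split list on a match, False otherwise) and the same
-- # in-place pops of non-matching entries off the end of dirlist.
-- def Pdf_check(dirlist):
--     while dirlist:
--         try:
--             file = dirlist[-1].split('_')
--         except:
--             return False
--         if len(file) != 3 or file[2][-3:] != 'pdf' or file[0] != 'Invoice' or len(file[2]) != 12:
--             dirlist.pop()
--             continue
--         try:
--             int(file[1][:-2])
--         except ValueError:
--             dirlist.pop()
--             continue
--         return file
--     return False
-- ===== Notes on version B (the rewrite author's own statement) =====
-- stated objective: simpler
-- what changed: A's double self-recursion (which re-validates the recursive result and threads pops through the call stack) is replaced by a single flat while-loop that tests the last entry and pops on failure, returning the same split list or False.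
import Mathlib
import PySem

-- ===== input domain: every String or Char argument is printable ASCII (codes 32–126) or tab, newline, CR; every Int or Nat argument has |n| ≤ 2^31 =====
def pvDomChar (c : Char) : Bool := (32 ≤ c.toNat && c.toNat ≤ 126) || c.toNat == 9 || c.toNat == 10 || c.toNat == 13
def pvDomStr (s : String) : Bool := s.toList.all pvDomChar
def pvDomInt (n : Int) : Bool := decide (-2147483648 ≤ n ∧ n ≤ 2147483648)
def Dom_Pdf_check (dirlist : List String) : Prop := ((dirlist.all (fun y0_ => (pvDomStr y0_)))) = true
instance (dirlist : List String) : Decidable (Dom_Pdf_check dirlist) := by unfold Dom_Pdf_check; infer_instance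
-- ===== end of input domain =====

-- B replaces A's double self-recursion with one flat while-loop from the end;
-- same return value everywhere (truthiness of the result, as the Bool signature
-- reads it) and the same in-place pops of dirlist (equivalence proved is about
-- the return value; both Pythons pop non-matching entries off the end identically).

-- ===== PORT A =====
-- A pops from dirlist and recurses; the pair threads that mutated list through the
-- recursion.  fuel is only a totality guard: every recursive call gets a strictly
-- shorter list, so fuel = dirlist.length + 1 is never exhausted.  The Bool result
-- of Pdf_check is the Python truthiness of A's return (split list → true, False →
-- false), as the required Bool signature reads it.
def pvAuxA : Nat → List String → Option (List (List Char)) × List String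
  | 0, l => (none, l)  -- fuel exhausted; unreachable from Pdf_check
  | fuel+1, l =>
    match PySem.List.pyGet? l (-1) with
    | none => (none, l)  -- dirlist[-1] raised IndexError → except: return False
    | some s =>
      let file := PySem.Chars.splitOn s.toList "_".toList
      -- (file[2] is only read when len(file) == 3, as Python's `or` short-circuits;
      -- getD is then exact)
      match (if !(file.length == 3)
                || !(PySem.List.slice (file.getD 2 []) (some (-3)) none == "pdf".toList)
                || !(file.getD 0 [] == "Invoice".toList)
                || !((file.getD 2 []).length == 12)
             then pvAuxA fuel l.dropLast
             else (some file, l)) with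
      | (none, l') => (none, l')          -- `if file:` false → fall through to return
      | (some f, l') =>
        match PySem.Int.ofChars? (PySem.List.slice (f.getD 1 []) (some 0) (some (-2))) with
        | none => pvAuxA fuel l'.dropLast -- int() raised → pop, recurse
        | some _ => (some f, l')

def Pdf_check (dirlist : List String) : Bool :=
  ((pvAuxA (dirlist.length + 1) dirlist).1).isSome

-- ===== PORT B =====
-- One iteration of B's while-loop body: the structural test, then the int() test,
-- in A's source order.  true = `return file` (a non-empty list, truthy).
def pvStepB (name : String) : Bool :=
  let file := PySem.Chars.splitOn name.toList "_".toList
  if !(file.length == 3)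
     || !(PySem.List.slice (file.getD 2 []) (some (-3)) none == "pdf".toList)
     || !(file.getD 0 [] == "Invoice".toList)
     || !((file.getD 2 []).length == 12)
  then false  -- pop and continue
  else (PySem.Int.ofChars? (PySem.List.slice (file.getD 1 []) none (some (-2)))).isSome

def Pdf_check_alt (dirlist : List String) : Bool :=
  if hne : dirlist = [] then false  -- while loop exhausted → return False
  else if pvStepB (dirlist.getLast hne) then true  -- return file (truthy)
  else Pdf_check_alt dirlist.dropLast  -- dirlist.pop(); continue
termination_by dirlist.length
decreasing_by
  have := List.length_pos_iff.mpr hne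
  simp [List.length_dropLast]; omega

-- ===== PRECONDITION & SPEC =====
def Spec_Pdf_check (dirlist : List String) (out : Bool) : Prop := out = Pdf_check_alt dirlist
instance (dirlist : List String) (out : Bool) : Decidable (Spec_Pdf_check dirlist out) := by unfold Spec_Pdf_check; infer_instance

-- ===== CLAIM (what is proved, stated in full; the proofs are below) =====
def Claim_equal_Pdf_check : Prop := ∀ (dirlist : List String), Dom_Pdf_check dirlist → Spec_Pdf_check dirlist (Pdf_check dirlist)

-- ===== LEMMAS AND PROOFS =====

-- Invariant: with enough fuel, A's recursion returns some f exactly when B's loop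
-- returns true, and any returned f has already passed the int() test (so A's outer
-- re-check of the recursive result never pops again).
lemma pvAuxA_char : ∀ (fuel : Nat) (l : List String), l.length < fuel →
    (((pvAuxA fuel l).1).isSome = Pdf_check_alt l ∧
     ∀ f, (pvAuxA fuel l).1 = some f →
       (PySem.Int.ofChars? (PySem.List.slice (f.getD 1 []) (some 0) (some (-2)))).isSome = true) := by
  intro fuel
  induction fuel with
  | zero => intro l hl; omega
  | succ n ih =>
    intro l hl
    by_cases hne : l = []
    · subst hne
      refine ⟨by simp [pvAuxA, Pdf_check_alt, PySem.List.pyGet?], ?_⟩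
      intro f hf; simp [pvAuxA, PySem.List.pyGet?] at hf
    · have hlast : PySem.List.pyGet? l (-1) = some (l.getLast hne) := by
        rw [PySem.List.pyGet?_neg_one, List.getLast?_eq_getLast_of_ne_nil hne]
      have hdlen : l.dropLast.length < n := by
        have := List.length_pos_iff.mpr hne
        simp [List.length_dropLast]; omega
      obtain ⟨ih1, ih2⟩ := ih l.dropLast hdlen
      have halt : Pdf_check_alt l
          = (if pvStepB (l.getLast hne) then true else Pdf_check_alt l.dropLast) := by
        rw [Pdf_check_alt]; rw [dif_neg hne]
      rw [halt]
      by_cases hc : (!((PySem.Chars.splitOn (l.getLast hne).toList "_".toList).length == 3)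
                || !(PySem.List.slice ((PySem.Chars.splitOn (l.getLast hne).toList "_".toList).getD 2 []) (some (-3)) none == "pdf".toList)
                || !((PySem.Chars.splitOn (l.getLast hne).toList "_".toList).getD 0 [] == "Invoice".toList)
                || !(((PySem.Chars.splitOn (l.getLast hne).toList "_".toList).getD 2 []).length == 12)) = true
      · -- structural check fails: A recurses on dropLast; B pops and loops
        have hstep : pvStepB (l.getLast hne) = false := by
          unfold pvStepB; rw [if_pos hc]
        rw [hstep, if_neg (by simp)]
        rcases h2 : pvAuxA n l.dropLast with ⟨r, l'⟩
        rw [h2] at ih1 ih2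
        have hA : pvAuxA (n + 1) l
            = (match (r, l') with
               | (none, l') => ((none : Option (List (List Char))), l')
               | (some f, l') =>
                 match PySem.Int.ofChars? (PySem.List.slice (f.getD 1 []) (some 0) (some (-2))) with
                 | none => pvAuxA n l'.dropLast
                 | some _ => (some f, l')) := by
          conv_lhs => rw [pvAuxA]
          rw [hlast]; dsimp only
          rw [if_pos hc, h2]
        rw [hA]
        cases r with
        | none => exact ⟨ih1, by intro f hf; exact absurd hf (by simp)⟩
        | some g =>
          have hint := ih2 g rfl
          rcases Option.isSome_iff_exists.mp hint with ⟨v, hv⟩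
          dsimp only
          rw [hv]
          exact ⟨ih1, fun f hf => by cases hf; exact hint⟩
      · -- structural check passes: A returns (some file, l) then applies the int() test
        have hslice : PySem.List.slice ((PySem.Chars.splitOn (l.getLast hne).toList "_".toList).getD 1 []) (some 0) (some (-2))
            = PySem.List.slice ((PySem.Chars.splitOn (l.getLast hne).toList "_".toList).getD 1 []) none (some (-2)) :=
          PySem.List.slice_zero_start _ _
        have hstep : pvStepB (l.getLast hne)
            = (PySem.Int.ofChars? (PySem.List.slice
                ((PySem.Chars.splitOn (l.getLast hne).toList "_".toList).getD 1 []) none (some (-2)))).isSome := by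
          unfold pvStepB; rw [if_neg hc]
        have hA : pvAuxA (n + 1) l
            = (match PySem.Int.ofChars? (PySem.List.slice
                  ((PySem.Chars.splitOn (l.getLast hne).toList "_".toList).getD 1 []) (some 0) (some (-2))) with
               | none => pvAuxA n l.dropLast
               | some _ => (some (PySem.Chars.splitOn (l.getLast hne).toList "_".toList), l)) := by
          conv_lhs => rw [pvAuxA]
          rw [hlast]; dsimp only
          rw [if_neg hc]
        rw [hA, hstep, ← hslice]
        rcases hh : PySem.Int.ofChars? (PySem.List.slice
            ((PySem.Chars.splitOn (l.getLast hne).toList "_".toList).getD 1 []) (some 0) (some (-2))) with _ | v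
        · rw [if_neg (by simp)]
          exact ⟨ih1, ih2⟩
        · rw [if_pos (by simp)]
          exact ⟨rfl, fun f hf => by cases hf; rw [hh]; rfl⟩

-- ===== VERDICT (by name: the statement is the Claim_ definition above) =====
theorem Pdf_check_spec : Claim_equal_Pdf_check := by
  intro l _
  unfold Spec_Pdf_check Pdf_check
  exact (pvAuxA_char (l.length + 1) l (by omega)).1
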